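-- pv_equiv track=rewrite | github.com/unnikrishnanNam/amFOSS-tasks | Task-03/All programs/Challenge3.py | compute_lcm
-- ===== SOURCE A (Python) =====
-- def compute_lcm(a):
--     count = 0
--     while True:
--         if a%2 == 0:
--             a = a//2
--         elif a%3 == 0:
--             a = a//3
--         elif a == 1:
--             break
--         else:
--             count = -1
--             break
--         count += 1
--     return count
-- ===== SOURCE B (Python) =====
-- def _max_pow(a, b):
--     # largest power p = b**i with p dividing a, found by multiplying upward; a is never modified
--     p, i = 1, 0
--     while a % (b * p) == 0:
--         p *= b
--         i += 1
--     return p, i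
--
--
-- def compute_lcm(a):
--     if a < 1:
--         return -1
--     p2, i = _max_pow(a, 2)
--     p3, j = _max_pow(a, 3)
--     return i + j if a == p2 * p3 else -1
-- ===== Notes on version B (the rewrite author's own statement) =====
-- stated objective: alternative
-- what changed: Instead of repeatedly dividing a down to 1, B never modifies a: it searches upward for the largest powers 2^i and 3^j dividing a (multiplying the candidate power each step) and returns i+j exactly when a == 2^i * 3^j, with negatives dispatched to -1 by a single sign test.
-- outside the precondition, e.g. on compute_lcm(0): A does not finish within the time limit, B returns -1
import Mathlib
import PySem

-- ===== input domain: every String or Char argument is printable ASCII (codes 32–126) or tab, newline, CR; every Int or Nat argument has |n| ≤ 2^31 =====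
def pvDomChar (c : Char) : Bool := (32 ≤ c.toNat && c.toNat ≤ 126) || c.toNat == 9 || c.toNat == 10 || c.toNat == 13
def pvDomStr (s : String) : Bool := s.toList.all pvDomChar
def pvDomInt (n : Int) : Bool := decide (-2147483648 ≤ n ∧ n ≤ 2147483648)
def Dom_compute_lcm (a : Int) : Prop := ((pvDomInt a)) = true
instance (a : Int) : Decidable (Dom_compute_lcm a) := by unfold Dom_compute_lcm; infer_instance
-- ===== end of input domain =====

-- B never modifies a: it searches upward for the largest powers 2^i and 3^j dividing a and returns i+j iff a = 2^i*3^j; an alternative algorithm, not claimed faster.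


-- termination helper: exact division by d > 1 shrinks |a|
theorem pv_div_natAbs_lt (a d : Int) (hd : 1 < d) (hdvd : d ∣ a) (ha : a ≠ 0) :
    (PySem.Int.floordiv a d).natAbs < a.natAbs := by
  rw [PySem.Int.floordiv_eq_ediv_of_pos (by omega)]
  obtain ⟨k, rfl⟩ := hdvd
  rw [Int.mul_ediv_cancel_left _ (by omega : d ≠ 0), Int.natAbs_mul]
  have hk : k.natAbs ≠ 0 := by simpa using fun h => ha (by simp [h])
  have hdn : 2 ≤ d.natAbs := by omega
  nlinarith [Nat.one_le_iff_ne_zero.mpr hk]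

-- ===== PORT A =====
def compute_lcm_loop (a : Int) (count : Int) : Int :=
  if h2 : PySem.Int.mod a 2 = 0 then
    if h0 : a = 0 then 0  -- Python loops forever here; a = 0 is outside Pre_
    else compute_lcm_loop (PySem.Int.floordiv a 2) (count + 1)
  else if h3 : PySem.Int.mod a 3 = 0 then
    compute_lcm_loop (PySem.Int.floordiv a 3) (count + 1)
  else if a = 1 then count
  else -1
termination_by a.natAbs
decreasing_by
  · exact pv_div_natAbs_lt a 2 (by omega) ((PySem.Int.mod_eq_zero_iff_dvd a 2).mp h2) h0
  · exact pv_div_natAbs_lt a 3 (by omega) ((PySem.Int.mod_eq_zero_iff_dvd a 3).mp h3)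
      (by intro h; rw [h] at h2; exact h2 rfl)

def compute_lcm (a : Int) : Int := compute_lcm_loop a 0

-- ===== PORT B =====
-- largest power p = b^i with p ∣ a, found by multiplying upward (Python _max_pow)
def max_pow_loop (a b p i : Int) : Int × Int :=
  if h : PySem.Int.mod a (b * p) = 0 then
    if hz : a = 0 ∨ p ≤ 0 ∨ b ≤ 1 then (p, i)  -- totality guard; unreachable from compute_lcm_alt on Pre_ (a = 0 makes Python diverge, and is excluded)
    else max_pow_loop a b (b * p) (i + 1)
  else (p, i)
termination_by a.natAbs - p.natAbs
decreasing_by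
  have hdvd : (b * p) ∣ a := (PySem.Int.mod_eq_zero_iff_dvd a (b * p)).mp h
  have ha0 : a ≠ 0 := fun h' => hz (Or.inl h')
  have hp0 : ¬ p ≤ 0 := fun h' => hz (Or.inr (Or.inl h'))
  have hb1 : ¬ b ≤ 1 := fun h' => hz (Or.inr (Or.inr h'))
  have hle : (b * p).natAbs ≤ a.natAbs :=
    Nat.le_of_dvd (Int.natAbs_pos.mpr ha0) (Int.natAbs_dvd_natAbs.mpr hdvd)
  have hmul : (b * p).natAbs = b.natAbs * p.natAbs := Int.natAbs_mul b p
  have hp : 1 ≤ p.natAbs := by omega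
  have hb : 2 ≤ b.natAbs := by omega
  have hlt : p.natAbs < (b * p).natAbs := by rw [hmul]; nlinarith
  exact Nat.sub_lt_sub_left (lt_of_lt_of_le hlt hle) hlt

def compute_lcm_alt (a : Int) : Int :=
  if a < 1 then -1
  else
    let q2 := max_pow_loop a 2 1 0
    let q3 := max_pow_loop a 3 1 0
    if a = q2.1 * q3.1 then q2.2 + q3.2 else -1

-- ===== PRECONDITION & SPEC =====
-- Pre_ excludes only a = 0, on which Python A loops forever (0 % 2 == 0 and 0 // 2 == 0), so A returns nothing there.
def Pre_compute_lcm (a : Int) : Prop := a ≠ 0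
instance (a : Int) : Decidable (Pre_compute_lcm a) := by unfold Pre_compute_lcm; infer_instance
def pvWitness_compute_lcm : Int := 6

def Spec_compute_lcm (a : Int) (out : Int) : Prop := out = compute_lcm_alt a
instance (a : Int) (out : Int) : Decidable (Spec_compute_lcm a out) := by unfold Spec_compute_lcm; infer_instance

-- ===== CLAIM (what is proved, stated in full; the proofs are below) =====
def Claim_equal_compute_lcm : Prop := ∀ (a : Int), Dom_compute_lcm a → Pre_compute_lcm a → Spec_compute_lcm a (compute_lcm a)

-- ===== LEMMAS AND PROOFS =====

theorem pv_max_pow_spec : ∀ (n : ℕ) (a b p i : Int), 2 ≤ b → 0 < a → a.natAbs - p.natAbs ≤ n →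
    ∀ k : ℕ, p = b ^ k → i = (k : Int) → p ∣ a →
      ∃ K : ℕ, max_pow_loop a b p i = (b ^ K, (K : Int)) ∧ b ^ K ∣ a ∧ ¬ b ^ (K + 1) ∣ a := by
  intro n
  induction n with
  | zero =>
    intro a b p i hb ha hfuel k hp hi hdvd
    have hbp : ¬ (b * p) ∣ a := by
      intro hd
      have hp0 : 0 < p := by rw [hp]; positivity
      have h1 : (b * p).natAbs ≤ a.natAbs :=
        Nat.le_of_dvd (Int.natAbs_pos.mpr (by omega)) (Int.natAbs_dvd_natAbs.mpr hd)
      have h2 : (b * p).natAbs = b.natAbs * p.natAbs := Int.natAbs_mul b p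
      have h3 : 1 ≤ p.natAbs := by omega
      have h4 : 2 ≤ b.natAbs := by omega
      have h5 : p.natAbs < (b * p).natAbs := by rw [h2]; nlinarith
      omega
    have hm : PySem.Int.mod a (b * p) ≠ 0 := by
      rw [Ne, PySem.Int.mod_eq_zero_iff_dvd]; exact hbp
    rw [max_pow_loop]
    simp only [hm, dite_false]
    refine ⟨k, by rw [hp, hi], by rw [← hp]; exact hdvd, ?_⟩
    rw [pow_succ, mul_comm (b ^ k) b, ← hp]
    exact hbp
  | succ n ih =>
    intro a b p i hb ha hfuel k hp hi hdvd
    have hp0 : 0 < p := by rw [hp]; positivity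
    rw [max_pow_loop]
    by_cases hm : PySem.Int.mod a (b * p) = 0
    · have hbp : (b * p) ∣ a := (PySem.Int.mod_eq_zero_iff_dvd a (b * p)).mp hm
      have hz : ¬ (a = 0 ∨ p ≤ 0 ∨ b ≤ 1) := by omega
      simp only [hm, hz, dite_true, dite_false]
      have h1 : (b * p).natAbs ≤ a.natAbs :=
        Nat.le_of_dvd (Int.natAbs_pos.mpr (by omega)) (Int.natAbs_dvd_natAbs.mpr hbp)
      have h2 : (b * p).natAbs = b.natAbs * p.natAbs := Int.natAbs_mul b p
      have h3 : 1 ≤ p.natAbs := by omega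
      have h4 : 2 ≤ b.natAbs := by omega
      have h5 : p.natAbs < (b * p).natAbs := by rw [h2]; nlinarith
      exact ih a b (b * p) (i + 1) hb ha (by omega) (k + 1)
        (by rw [hp, pow_succ, mul_comm (b ^ k) b]) (by rw [hi]; push_cast; ring) hbp
    · simp only [hm, dite_false]
      refine ⟨k, by rw [hp, hi], by rw [← hp]; exact hdvd, ?_⟩
      rw [pow_succ, mul_comm (b ^ k) b, ← hp]
      intro hd
      exact hm ((PySem.Int.mod_eq_zero_iff_dvd a (b * p)).mpr hd)

-- uniqueness of the maximal exponent
theorem pv_exp_unique (b : Int) (hb : 2 ≤ b) (a : Int) (K1 K2 : ℕ)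
    (h1 : b ^ K1 ∣ a ∧ ¬ b ^ (K1 + 1) ∣ a) (h2 : b ^ K2 ∣ a ∧ ¬ b ^ (K2 + 1) ∣ a) : K1 = K2 := by
  by_contra hne
  rcases Nat.lt_or_ge K1 K2 with h | h
  · exact h1.2 (dvd_trans (pow_dvd_pow b h) h2.1)
  · have : K2 < K1 := by omega
    exact h2.2 (dvd_trans (pow_dvd_pow b this) h1.1)

-- A's loop on 3^j
theorem pv_not_two_dvd_pow3 (j : ℕ) : ¬ (2:Int) ∣ 3 ^ j := by
  have hodd : Odd ((3:Int) ^ j) := Odd.pow ⟨1, by ring⟩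
  rcases hodd with ⟨m, hm⟩
  rintro ⟨t, ht⟩
  omega

theorem pv_loopA_pow3 : ∀ (j : ℕ) (c : Int), compute_lcm_loop ((3:Int) ^ j) c = c + j := by
  intro j
  induction j with
  | zero =>
    intro c
    rw [compute_lcm_loop]
    norm_num [PySem.Int.mod_eq_emod_of_pos]
  | succ j ih =>
    intro c
    have h2 : PySem.Int.mod ((3:Int) ^ (j + 1)) 2 ≠ 0 := by
      rw [Ne, PySem.Int.mod_eq_zero_iff_dvd]; exact pv_not_two_dvd_pow3 (j + 1)
    have h3 : PySem.Int.mod ((3:Int) ^ (j + 1)) 3 = 0 := by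
      rw [PySem.Int.mod_eq_zero_iff_dvd]; exact ⟨3 ^ j, by ring⟩
    have hdiv : PySem.Int.floordiv ((3:Int) ^ (j + 1)) 3 = 3 ^ j := by
      rw [PySem.Int.floordiv_eq_ediv_of_pos (by omega), pow_succ, mul_comm]
      exact Int.mul_ediv_cancel_left _ (by omega)
    rw [compute_lcm_loop]
    simp only [h2, h3, dite_true, dite_false, hdiv]
    rw [ih (c + 1)]
    push_cast; ring

-- A's loop on 2^i * 3^j
theorem pv_loopA_pow : ∀ (i j : ℕ) (c : Int), compute_lcm_loop ((2:Int) ^ i * 3 ^ j) c = c + i + j := by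
  intro i
  induction i with
  | zero =>
    intro j c
    rw [pow_zero, one_mul, pv_loopA_pow3]
    push_cast; ring
  | succ i ih =>
    intro j c
    have h2 : PySem.Int.mod ((2:Int) ^ (i + 1) * 3 ^ j) 2 = 0 := by
      rw [PySem.Int.mod_eq_zero_iff_dvd]; exact ⟨2 ^ i * 3 ^ j, by ring⟩
    have h0 : (2:Int) ^ (i + 1) * 3 ^ j ≠ 0 := by positivity
    have hdiv : PySem.Int.floordiv ((2:Int) ^ (i + 1) * 3 ^ j) 2 = 2 ^ i * 3 ^ j := by
      rw [PySem.Int.floordiv_eq_ediv_of_pos (by omega)]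
      have : (2:Int) ^ (i + 1) * 3 ^ j = 2 * (2 ^ i * 3 ^ j) := by ring
      rw [this]
      exact Int.mul_ediv_cancel_left _ (by omega)
    rw [compute_lcm_loop]
    simp only [h2, h0, dite_true, dite_false, hdiv]
    rw [ih j (c + 1)]
    push_cast; ring

-- A's loop returns -1 on positive non-3-smooth inputs
theorem pv_loopA_notform : ∀ (n : ℕ) (a c : Int), a.natAbs ≤ n → 0 < a →
    (∀ i j : ℕ, a ≠ 2 ^ i * 3 ^ j) → compute_lcm_loop a c = -1 := by
  intro n
  induction n with
  | zero => intro a c hle ha _; omega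
  | succ n ih =>
    intro a c hle ha hform
    rw [compute_lcm_loop]
    by_cases h2 : PySem.Int.mod a 2 = 0
    · obtain ⟨k, rfl⟩ := (PySem.Int.mod_eq_zero_iff_dvd _ 2).mp h2
      have hdiv : PySem.Int.floordiv (2 * k) 2 = k := by
        rw [PySem.Int.floordiv_eq_ediv_of_pos (by omega)]
        exact Int.mul_ediv_cancel_left _ (by omega)
      simp only [h2, dite_true, hdiv]
      rw [dif_neg (by omega : ¬ ((2:Int) * k = 0))]
      exact ih k (c + 1) (by omega) (by omega)
        (fun i j h => hform (i + 1) j (by rw [h]; ring))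
    · by_cases h3 : PySem.Int.mod a 3 = 0
      · obtain ⟨k, rfl⟩ := (PySem.Int.mod_eq_zero_iff_dvd _ 3).mp h3
        have hdiv : PySem.Int.floordiv (3 * k) 3 = k := by
          rw [PySem.Int.floordiv_eq_ediv_of_pos (by omega)]
          exact Int.mul_ediv_cancel_left _ (by omega)
        simp only [h2, h3, dite_true, dite_false, hdiv]
        exact ih k (c + 1) (by omega) (by omega)
          (fun i j h => hform i (j + 1) (by rw [h]; ring))
      · have h1 : a ≠ 1 := fun h => hform 0 0 (by rw [h]; ring)
        have h2d : ¬ (2:Int) ∣ a := fun hd => h2 ((PySem.Int.mod_eq_zero_iff_dvd a 2).mpr hd)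
        have h3d : ¬ (3:Int) ∣ a := fun hd => h3 ((PySem.Int.mod_eq_zero_iff_dvd a 3).mpr hd)
        simp [h2d, h3d, h1]

-- A's loop returns -1 on negative inputs
theorem pv_loopA_neg : ∀ (n : ℕ) (a c : Int), a.natAbs ≤ n → a < 0 → compute_lcm_loop a c = -1 := by
  intro n
  induction n with
  | zero => intro a c hle ha; omega
  | succ n ih =>
    intro a c hle ha
    rw [compute_lcm_loop]
    by_cases h2 : PySem.Int.mod a 2 = 0
    · obtain ⟨k, rfl⟩ := (PySem.Int.mod_eq_zero_iff_dvd _ 2).mp h2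
      have hdiv : PySem.Int.floordiv (2 * k) 2 = k := by
        rw [PySem.Int.floordiv_eq_ediv_of_pos (by omega)]
        exact Int.mul_ediv_cancel_left _ (by omega)
      simp only [h2, dite_true, hdiv]
      rw [dif_neg (by omega : ¬ ((2:Int) * k = 0))]
      exact ih k (c + 1) (by omega) (by omega)
    · by_cases h3 : PySem.Int.mod a 3 = 0
      · obtain ⟨k, rfl⟩ := (PySem.Int.mod_eq_zero_iff_dvd _ 3).mp h3
        have hdiv : PySem.Int.floordiv (3 * k) 3 = k := by
          rw [PySem.Int.floordiv_eq_ediv_of_pos (by omega)]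
          exact Int.mul_ediv_cancel_left _ (by omega)
        simp only [h2, h3, dite_true, dite_false, hdiv]
        exact ih k (c + 1) (by omega) (by omega)
      · have h2d : ¬ (2:Int) ∣ a := fun hd => h2 ((PySem.Int.mod_eq_zero_iff_dvd a 2).mpr hd)
        have h3d : ¬ (3:Int) ∣ a := fun hd => h3 ((PySem.Int.mod_eq_zero_iff_dvd a 3).mpr hd)
        simp [h2d, h3d]
        intro h
        omega

-- ===== VERDICT (by name: the statement is the Claim_ definition above) =====
theorem compute_lcm_spec : Claim_equal_compute_lcm := by
  intro a _ hpre
  unfold Spec_compute_lcm compute_lcm compute_lcm_alt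
  by_cases hneg : a < 1
  · have ha : a < 0 := by
      have : a ≠ 0 := hpre
      omega
    rw [if_pos hneg]
    exact pv_loopA_neg a.natAbs a 0 le_rfl ha
  · have ha : 0 < a := by omega
    rw [if_neg hneg]
    obtain ⟨I, hI, hI1, hI2⟩ :=
      pv_max_pow_spec a.natAbs a 2 1 0 (by omega) ha (by omega) 0 (by norm_num) rfl (one_dvd a)
    obtain ⟨J, hJ, hJ1, hJ2⟩ :=
      pv_max_pow_spec a.natAbs a 3 1 0 (by omega) ha (by omega) 0 (by norm_num) rfl (one_dvd a)
    simp only [hI, hJ]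
    by_cases hform : ∃ i j : ℕ, a = 2 ^ i * 3 ^ j
    · obtain ⟨i, j, rfl⟩ := hform
      have hIi : I = i := by
        refine pv_exp_unique 2 (by omega) _ I i ⟨hI1, hI2⟩ ⟨dvd_mul_right _ _, ?_⟩
        intro hd
        rw [pow_succ] at hd
        exact pv_not_two_dvd_pow3 j
          ((mul_dvd_mul_iff_left (by positivity : ((2:Int) ^ i) ≠ 0)).mp hd)
      have hJj : J = j := by
        refine pv_exp_unique 3 (by omega) _ J j ⟨hJ1, hJ2⟩ ⟨dvd_mul_left _ _, ?_⟩
        intro hd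
        rw [pow_succ, mul_comm ((2:Int) ^ i) (3 ^ j)] at hd
        have h3d : (3:Int) ∣ 2 ^ i :=
          (mul_dvd_mul_iff_left (by positivity : ((3:Int) ^ j) ≠ 0)).mp hd
        have h32 : (3:Int) ∣ 2 := Int.prime_three.dvd_of_dvd_pow h3d
        omega
      subst hIi hJj
      rw [if_pos rfl, pv_loopA_pow I J 0]
      ring
    · push_neg at hform
      rw [if_neg (fun h => hform I J h)]
      exact pv_loopA_notform a.natAbs a 0 le_rfl ha hform
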